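-- pv_equiv track=rewrite | github.com/tkfka1/CodingTest | 프로그래머스/unrated/181904. 세로 읽기/세로 읽기.py | solution
-- ===== SOURCE A (Python) =====
-- def solution(my_string, m, c):
--     answer = ''
--     li = []
--     temp = ""
--     temp_m = 0
--     for k,v in enumerate(my_string):
--         temp += v
--         temp_m += 1
--         if temp_m == m:
--             li.append(temp)
--             temp = ""
--             temp_m = 0
--
--     for i in li:
--         answer += i[c-1]
--
--     return answer
-- ===== SOURCE B (Python) =====
-- def solution(my_string, m, c):
--     return my_string[c - 1::m][:len(my_string) // m]
-- ===== Notes on version B (the rewrite author's own statement) =====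
-- stated objective: idiomatic
-- what changed: Replaces the explicit character-accumulating chunking loop plus a second concatenation loop with a single strided slice my_string[c-1::m] trimmed to the number of full rows with [:len(my_string)//m].
-- outside the precondition, e.g. on solution('abcd', 2, 0): A returns 'bd', B returns 'd'; on solution('ab', 0, 1): A returns '', B raises ValueError; on solution('abcd', 2, -1): A returns 'ac', B returns 'c'
import Mathlib
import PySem

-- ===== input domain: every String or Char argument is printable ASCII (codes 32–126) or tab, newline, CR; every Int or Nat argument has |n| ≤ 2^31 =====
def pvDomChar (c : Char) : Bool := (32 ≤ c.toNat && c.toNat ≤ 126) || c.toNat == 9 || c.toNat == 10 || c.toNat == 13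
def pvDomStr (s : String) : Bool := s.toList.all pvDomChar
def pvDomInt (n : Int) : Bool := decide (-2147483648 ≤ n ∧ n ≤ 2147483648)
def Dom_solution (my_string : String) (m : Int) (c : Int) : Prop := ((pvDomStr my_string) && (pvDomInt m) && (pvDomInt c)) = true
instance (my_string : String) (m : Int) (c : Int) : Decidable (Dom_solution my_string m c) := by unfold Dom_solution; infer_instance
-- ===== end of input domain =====

-- B reads the column with one strided slice trimmed to the number of full rows,
-- instead of A's row-building loop plus a second concatenation loop (idiomatic; same cost).


-- ===== PORT A =====
def solutionStep (m : Int) (st : List (List Char) × List Char × Int) (v : Char) :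
    List (List Char) × List Char × Int :=
  let temp := st.2.1 ++ [v]
  let temp_m := st.2.2 + 1
  if temp_m = m then (st.1 ++ [temp], [], 0) else (st.1, temp, temp_m)

def solution (my_string : String) (m : Int) (c : Int) : String :=
  let st := (PySem.List.enumerate my_string.toList).foldl
      (fun st kv => solutionStep m st kv.2) (([] : List (List Char)), ([] : List Char), (0 : Int))
  -- second loop: answer += i[c-1]; Python raises IndexError when pyGet? = none (outside Pre_)
  String.ofList (st.1.foldl
      (fun acc i => acc ++ ((PySem.List.pyGet? i (c - 1)).map (fun ch => [ch])).getD []) [])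

-- ===== PORT B =====
def solution_alt (my_string : String) (m : Int) (c : Int) : String :=
  -- my_string[c-1::m][:len(my_string)//m]; slice? = none only for m = 0 (Python ValueError, outside Pre_)
  match PySem.Str.slice? my_string (some (c - 1)) none m with
  | none => ""
  | some t => PySem.Str.slice t none (some (PySem.Int.floordiv (PySem.Str.len my_string) m))



-- ===== PRECONDITION & SPEC =====
-- Pre_ excludes zero width m = 0 (A returns '', B's slice raises ValueError) and out-of-range
-- columns (c ≤ 0 or c > m) in the presence of a full row, where A either raises IndexError or
-- returns the column picked by Python's accidental negative-index wraparound.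
def Pre_solution (my_string : String) (m : Int) (c : Int) : Prop :=
  (1 ≤ c ∧ c ≤ m) ∨ (my_string.toList.length : Int) < m ∨ m < 0
instance (my_string : String) (m : Int) (c : Int) : Decidable (Pre_solution my_string m c) := by
  unfold Pre_solution; infer_instance

def pvWitness_solution : String × Int × Int := ("abcdefgh", 3, 2)

def Spec_solution (my_string : String) (m : Int) (c : Int) (out : String) : Prop := out = solution_alt my_string m c
instance (my_string : String) (m : Int) (c : Int) (out : String) : Decidable (Spec_solution my_string m c out) := by unfold Spec_solution; infer_instance

-- ===== CLAIM (what is proved, stated in full; the proofs are below) =====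
def Claim_equal_solution : Prop := ∀ (my_string : String) (m : Int) (c : Int), Dom_solution my_string m c → Pre_solution my_string m c → Spec_solution my_string m c (solution my_string m c)

-- ===== LEMMAS AND PROOFS =====

-- chunks of full rows of width mN
def chunksF (mN : Nat) (xs : List Char) : List (List Char) :=
  if h : mN ≤ xs.length ∧ 0 < mN then
    xs.take mN :: chunksF mN (xs.drop mN)
  else []
termination_by xs.length
decreasing_by simp; omega

theorem enum_fold (m : Int) (xs : List Char) : ∀ (s0 : Int) st,
    (PySem.List.enumerate xs s0).foldl (fun st kv => solutionStep m st kv.2) st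
      = xs.foldl (solutionStep m) st := by
  induction xs with
  | nil => intro s0 st; simp [PySem.List.enumerate_nil]
  | cons x xs ih => intro s0 st; simp [PySem.List.enumerate_cons, List.foldl_cons, ih]

theorem fold_under (m : Int) : ∀ (ys temp : List Char) (li : List (List Char)),
    ((temp.length : Int) + ys.length < m ∨ m ≤ 0) →
    ys.foldl (solutionStep m) (li, temp, (temp.length : Int))
      = (li, temp ++ ys, ((temp.length : Int) + ys.length)) := by
  intro ys
  induction ys with
  | nil => intro temp li h; simp
  | cons y ys ih =>
    intro temp li h
    have hne : (temp.length : Int) + 1 ≠ m := by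
      rcases h with h | h
      · simp at h; omega
      · omega
    simp only [List.foldl_cons, solutionStep, if_neg hne]
    have hih : (((temp ++ [y]).length : Int)) + ys.length < m ∨ m ≤ 0 := by
      rcases h with h | h
      · left; simp at h ⊢; omega
      · right; exact h
    have := ih (temp ++ [y]) li hih
    simp only [List.append_assoc, List.singleton_append, List.length_append, List.length_cons,
      List.length_nil] at this
    push_cast at this
    rw [this]
    simp
    push_cast
    ring

theorem fold_fill (m : Int) : ∀ (ys temp : List Char) (li : List (List Char)),
    ys ≠ [] → (temp.length : Int) + ys.length = m →
    ys.foldl (solutionStep m) (li, temp, (temp.length : Int))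
      = (li ++ [temp ++ ys], [], 0) := by
  intro ys
  induction ys with
  | nil => intro temp li h; simp at h
  | cons y ys ih =>
    intro temp li _ h
    by_cases hy : ys = []
    · subst hy
      have : (temp.length : Int) + 1 = m := by simp at h; omega
      simp only [List.foldl_cons, solutionStep, if_pos this]
      simp
    · have hne : (temp.length : Int) + 1 ≠ m := by
        have hlen : 0 < ys.length := List.length_pos_iff.mpr hy
        simp at h
        omega
      simp only [List.foldl_cons, solutionStep, if_neg hne]
      have := ih (temp ++ [y]) li hy (by simp at h ⊢; push_cast; omega)
      simp only [List.append_assoc, List.singleton_append, List.length_append, List.length_cons,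
        List.length_nil] at this
      push_cast at this
      rw [this]

theorem fold_chunks (mN : Nat) (hm : 0 < mN) : ∀ (fuel : Nat) (xs : List Char)
    (li : List (List Char)), xs.length ≤ fuel →
    (xs.foldl (solutionStep (mN : Int)) (li, [], 0)).1 = li ++ chunksF mN xs := by
  intro fuel
  induction fuel with
  | zero =>
    intro xs li h
    have : xs = [] := List.length_eq_zero_iff.mp (Nat.le_zero.mp h)
    subst this
    rw [chunksF]
    simp
  | succ n ih =>
    intro xs li h
    by_cases hlt : xs.length < mN
    · have h0 : ((List.nil (α := Char)).length : Int) = 0 := by simp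
      have := fold_under (mN : Int) xs [] li (Or.inl (by simp; omega))
      rw [chunksF]
      simp only [h0] at this ⊢
      rw [this]
      have : ¬ (mN ≤ xs.length ∧ 0 < mN) := by omega
      simp [this]
    · push_neg at hlt
      rw [chunksF]
      have hcond : mN ≤ xs.length ∧ 0 < mN := ⟨hlt, hm⟩
      simp only [dif_pos hcond]
      conv_lhs => rw [← List.take_append_drop mN xs]
      rw [List.foldl_append]
      have hfill := fold_fill (mN : Int) (xs.take mN) [] li
        (by apply List.ne_nil_of_length_pos; simp; omega)
        (by simp; omega)
      simp only [List.length_nil, Nat.cast_zero, List.nil_append] at hfill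
      rw [hfill]
      rw [ih (xs.drop mN) (li ++ [xs.take mN]) (by simp; omega)]
      simp

theorem filterMap_eq_map_of_some {α β : Type} (l : List α) (f : α → Option β) (g : α → β)
    (h : ∀ a ∈ l, f a = some (g a)) : l.filterMap f = l.map g := by
  induction l with
  | nil => simp
  | cons x l ih =>
    simp only [List.filterMap_cons, h x (by simp), List.map_cons]
    rw [ih (fun a ha => h a (by simp [ha]))]


theorem A_flat (mN cN : Nat) (h1 : 1 ≤ cN) (h2 : cN ≤ mN) : ∀ (fuel : Nat) (xs : List Char),
    xs.length ≤ fuel →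
    (chunksF mN xs).foldl
        (fun acc i => acc ++ ((PySem.List.pyGet? i ((cN : Int) - 1)).map (fun ch => [ch])).getD [])
        []
      = (List.range (xs.length / mN)).map (fun k => (xs[cN - 1 + mN * k]?).getD ' ') := by
  intro fuel
  induction fuel with
  | zero =>
    intro xs h
    have hx : xs = [] := List.length_eq_zero_iff.mp (Nat.le_zero.mp h)
    subst hx
    rw [chunksF]
    simp
  | succ n ih =>
    intro xs h
    by_cases hlt : xs.length < mN
    · rw [chunksF]
      have hcond : ¬ (mN ≤ xs.length ∧ 0 < mN) := by omega
      rw [dif_neg hcond]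
      rw [Nat.div_eq_of_lt hlt]
      simp
    · push_neg at hlt
      have hm : 0 < mN := by omega
      rw [chunksF, dif_pos ⟨hlt, hm⟩]
      have hidx : ((cN : Int) - 1) = ((cN - 1 : Nat) : Int) := by omega
      have hget : PySem.List.pyGet? (xs.take mN) ((cN : Int) - 1)
          = some (xs[cN - 1]?.getD ' ') := by
        rw [hidx, PySem.List.pyGet?_natCast]
        rw [List.getElem?_take_of_lt (by omega)]
        have hlt' : cN - 1 < xs.length := by omega
        simp [List.getElem?_eq_getElem hlt']
      have hpull : ∀ (l : List (List Char)) (a : List Char),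
          l.foldl (fun acc i => acc ++ ((PySem.List.pyGet? i ((cN : Int) - 1)).map (fun ch => [ch])).getD []) a
            = a ++ l.foldl (fun acc i => acc ++ ((PySem.List.pyGet? i ((cN : Int) - 1)).map (fun ch => [ch])).getD []) [] := by
        intro l
        induction l with
        | nil => intro a; simp
        | cons i l ihl =>
          intro a
          simp only [List.foldl_cons]
          rw [ihl, ihl (([]) ++ _)]
          simp
      simp only [List.foldl_cons, hget]
      rw [hpull]
      rw [ih (xs.drop mN) (by simp; omega)]
      have hdiv : xs.length / mN = (xs.drop mN).length / mN + 1 := by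
        simp only [List.length_drop]
        rw [Nat.div_eq_sub_div hm hlt]
      rw [hdiv, List.range_succ_eq_map]
      simp only [List.map_cons, List.map_map, List.length_drop]
      refine congrArg₂ List.cons (by simp) ?_
      apply List.map_congr_left
      intro k hk
      simp only [Function.comp_apply, List.getElem?_drop]
      rw [show mN + (cN - 1 + mN * k) = cN - 1 + mN * (k + 1) from by ring]

theorem B_take (mN cN : Nat) (h1 : 1 ≤ cN) (h2 : cN ≤ mN) (xs : List Char)
    (hml : mN ≤ xs.length) :
    PySem.List.slice? xs (some ((cN : Int) - 1)) none (mN : Int)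
      = some ((List.range ((xs.length - cN + mN) / mN)).map
          (fun k => (xs[cN - 1 + mN * k]?).getD ' ')) := by
  have hm : 0 < mN := by omega
  rw [PySem.List.slice?, PySem.List.sliceIndices]
  rw [if_neg (show ¬ ((mN : Int) = 0) by omega)]
  simp only [if_neg (show ¬ ((mN : Int) < 0) by omega), if_pos (show (0:Int) < (mN:Int) by omega)]
  have hs : (if (cN : Int) - 1 < 0 then max ((cN : Int) - 1 + (xs.length : Int)) 0
      else min ((cN : Int) - 1) (xs.length : Int)) = ((cN - 1 : Nat) : Int) := by
    rw [if_neg (by omega), min_eq_left (by omega)]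
    omega
  rw [hs]
  rw [if_pos (show ((cN - 1 : Nat) : Int) < (xs.length : Int) by omega)]
  have hcnt : (((xs.length : Int) - ((cN - 1 : Nat) : Int) + (mN : Int) - 1) / (mN : Int)).toNat
      = (xs.length - cN + mN) / mN := by
    have he : ((xs.length : Int) - ((cN - 1 : Nat) : Int) + (mN : Int) - 1)
        = ((xs.length - cN + mN : Nat) : Int) := by push_cast; omega
    rw [he, ← Int.natCast_div]
    exact Int.toNat_natCast _
  rw [hcnt]
  congr 1
  apply filterMap_eq_map_of_some
  intro a ha
  rw [List.mem_range] at ha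
  set D := (xs.length - cN + mN) / mN with hD
  have hQ : mN * D ≤ xs.length - cN + mN := by
    rw [hD, Nat.mul_comm]; exact Nat.div_mul_le_self _ _
  have hP : mN * a + mN ≤ mN * D := by
    calc mN * a + mN = mN * (a + 1) := by ring
    _ ≤ mN * D := Nat.mul_le_mul_left mN ha
  have hidx : (((cN - 1 : Nat) : Int) + (mN : Int) * (a : Int)).toNat = cN - 1 + mN * a := by
    have : (((cN - 1 : Nat) : Int) + (mN : Int) * (a : Int)) = ((cN - 1 + mN * a : Nat) : Int) := by
      push_cast; ring
    rw [this, Int.toNat_natCast]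
  rw [hidx]
  have hbound : cN - 1 + mN * a < xs.length := by
    have h3 := hQ
    have h4 := hP
    generalize mN * a = P at *
    generalize mN * D = Q at *
    omega
  simp [List.getElem?_eq_getElem hbound]

theorem slice_nil_of_len_le (L : List Char) (d : Int) (h : (L.length : Int) + d ≤ 0) :
    PySem.List.slice L none (some d) = [] := by
  by_cases hd : 0 ≤ d
  · have hL : L = [] := List.length_eq_zero_iff.mp (by omega)
    subst hL
    rw [PySem.List.slice_to _ hd]
    simp
  · push_neg at hd
    have hk : d = -(((-d).toNat : Nat) : Int) := by omega
    have hkpos : 0 < (-d).toNat := by omega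
    rw [hk, PySem.List.slice_to_neg_natCast L (-d).toNat hkpos]
    rw [show L.length - (-d).toNat = 0 from by omega]
    simp

theorem helper_fmr {β : Type} (f : Nat → Option β) (n : Nat) :
    ((List.filterMap f (List.range n)).length : Int) ≤ (n : Int) := by
  exact_mod_cast le_trans (List.length_filterMap_le _ _) (le_of_eq List.length_range)

theorem B_neg (xs : List Char) (m c : Int) (hm : m < 0) :
    ∃ L, PySem.List.slice? xs (some (c - 1)) none m = some L ∧
      (L.length : Int) + (xs.length : Int).fdiv m ≤ 0 := by
  have hd : (xs.length : Int).fdiv m = (-(xs.length : Int)) / (-m) := by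
    rw [← Int.neg_fdiv_neg, Int.fdiv_eq_ediv_of_nonneg _ (by omega)]
  have hdle : (xs.length : Int).fdiv m ≤ 0 := by
    rw [hd]
    calc (-(xs.length : Int)) / (-m) ≤ 0 / (-m) := Int.ediv_le_ediv (by omega) (by omega)
    _ = 0 := Int.zero_ediv _
  rw [PySem.List.slice?, PySem.List.sliceIndices]
  rw [if_neg (show ¬ m = 0 by omega)]
  simp only [if_pos hm, if_neg (show ¬ (0:Int) < m by omega)]
  set st := (if c - 1 < 0 then max (c - 1 + (xs.length : Int)) (-1)
      else min (c - 1) ((xs.length : Int) - 1)) with hst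
  by_cases hlt : -1 < st
  · rw [if_pos hlt]
    refine ⟨_, rfl, ?_⟩
    have hXle : ((List.filterMap (fun x => xs[(st + m * (x : Nat) : Int).toNat]?)
        (List.range ((st - -1 + -m - 1) / -m).toNat)).length : Int)
          ≤ ((((st - -1 + -m - 1) / -m).toNat : Nat) : Int) := helper_fmr _ _
    have h1 : (0:Int) ≤ (st - -1 + -m - 1) / -m := Int.ediv_nonneg (by omega) (by omega)
    have hcnt : ((((st - -1 + -m - 1) / -m).toNat : Nat) : Int) = (st + -m) / -m := by
      rw [Int.toNat_of_nonneg h1]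
      congr 1
      omega
    have hsum : ((((st - -1 + -m - 1) / -m).toNat : Nat) : Int) + (xs.length : Int).fdiv m ≤ 0 := by
      rw [hcnt, hd]
      have hsu : st ≤ (xs.length : Int) - 1 := by rw [hst]; split_ifs <;> omega
      have hQM : ((st + -m) / -m) * (-m) ≤ st + -m := Int.ediv_mul_le _ (by omega)
      have hTM : ((-(xs.length:Int)) / -m) * (-m) ≤ -(xs.length:Int) := Int.ediv_mul_le _ (by omega)
      by_contra hcon
      push_neg at hcon
      have hge := Int.lt_iff_add_one_le.mp hcon
      rw [zero_add] at hge
      have hmul : (1:Int) * (-m) ≤ ((st + -m) / -m + (-(xs.length:Int)) / -m) * (-m) :=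
        mul_le_mul_of_nonneg_right hge (by omega)
      have hdist : ((st + -m) / -m + (-(xs.length:Int)) / -m) * (-m)
          = ((st + -m) / -m) * (-m) + ((-(xs.length:Int)) / -m) * (-m) := by ring
      linarith
    linarith [hXle, hsum]
  · rw [if_neg hlt]
    refine ⟨_, rfl, ?_⟩
    simpa using hdle

theorem B_some (s : String) (m c : Int) (hm : m ≠ 0) :
    ∃ t, PySem.Str.slice? s (some (c - 1)) none m = some t := by
  rw [PySem.Str.slice?]
  rw [PySem.Chars.slice?_eq_listSlice?]
  rw [PySem.List.slice?, if_neg hm]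
  exact ⟨_, rfl⟩

theorem Bval (d : Int) (t : List Char) (hd : 0 ≤ d) :
    PySem.Str.slice (String.ofList t) none (some d) = String.ofList (t.take d.toNat) := by
  rw [PySem.Str.slice]
  rw [PySem.Chars.slice_eq_listSlice]
  rw [String.toList_ofList]
  rw [PySem.List.slice_to t hd]

theorem floordiv_len (s : String) (mN : Nat) :
    PySem.Int.floordiv (PySem.Str.len s) (mN : Int) = ((s.toList.length / mN : Nat) : Int) := by
  simp [PySem.Int.floordiv, PySem.Str.len, ← Int.ofNat_fdiv]

theorem floordiv_len_eq_fdiv (s : String) (m : Int) :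
    PySem.Int.floordiv (PySem.Str.len s) m = ((s.toList.length : Int)).fdiv m := by
  simp [PySem.Int.floordiv, PySem.Str.len]

theorem solution_eq_alt (s : String) (m c : Int) (hpre : Pre_solution s m c) :
    solution s m c = solution_alt s m c := by
  simp only [solution, solution_alt]
  rw [enum_fold]
  have hpre' : (1 ≤ c ∧ c ≤ m) ∨ ((s.toList.length : Int) < m) ∨ m < 0 := hpre
  by_cases hmneg : m < 0
  · have h0 : ((List.nil (α := Char)).length : Int) = 0 := by simp
    have hA := fold_under m s.toList [] [] (Or.inr (by omega))
    simp only [h0] at hA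
    rw [hA]
    obtain ⟨L, hL, hlen⟩ := B_neg s.toList m c hmneg
    have hstr : PySem.Str.slice? s (some (c - 1)) none m = some (String.ofList L) := by
      rw [PySem.Str.slice?, PySem.Chars.slice?_eq_listSlice?, hL]
      rfl
    simp only [hstr]
    rw [floordiv_len_eq_fdiv]
    rw [PySem.Str.slice, PySem.Chars.slice_eq_listSlice, String.toList_ofList]
    rw [slice_nil_of_len_le L _ hlen]
    simp
  · have hm1 : (1:Int) ≤ m := by
      rcases hpre' with ⟨h1, h2⟩ | h | h
      · omega
      · have : (0:Int) ≤ s.toList.length := by positivity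
        omega
      · exact absurd h hmneg
    set mN := m.toNat with hmN
    have hmc : (mN : Int) = m := Int.toNat_of_nonneg (by omega)
    have hmN0 : 0 < mN := by omega
    rw [← hmc]
    rw [fold_chunks mN hmN0 s.toList.length s.toList [] le_rfl, List.nil_append]
    by_cases hc : 1 ≤ c ∧ c ≤ m
    · obtain ⟨hc1, hcm⟩ := hc
      set cN := c.toNat with hcN
      have hcc : (cN : Int) = c := Int.toNat_of_nonneg (by omega)
      have hcN1 : 1 ≤ cN := by omega
      have hcmN : cN ≤ mN := by omega
      rw [← hcc]
      rw [A_flat mN cN hcN1 hcmN s.toList.length s.toList le_rfl]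
      by_cases hlen : mN ≤ s.toList.length
      · have hstr : PySem.Str.slice? s (some ((cN : Int) - 1)) none (mN : Int)
            = some (String.ofList ((List.range ((s.toList.length - cN + mN) / mN)).map
                (fun k => (s.toList[cN - 1 + mN * k]?).getD ' '))) := by
          rw [PySem.Str.slice?, PySem.Chars.slice?_eq_listSlice?]
          rw [B_take mN cN hcN1 hcmN s.toList hlen]
          rfl
        simp only [hstr]
        rw [floordiv_len s mN, Bval _ _ (by positivity)]
        rw [Int.toNat_natCast]
        rw [← List.map_take, List.take_range]
        rw [Nat.min_eq_left (Nat.div_le_div_right (by omega))]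
      · push_neg at hlen
        obtain ⟨t, ht⟩ := B_some s (mN : Int) (cN : Int) (by omega)
        simp only [ht]
        have hd0 : s.toList.length / mN = 0 := Nat.div_eq_of_lt hlen
        rw [hd0]
        have ht' : ∃ l, t = String.ofList l := ⟨t.toList, String.ofList_toList.symm⟩
        obtain ⟨l, rfl⟩ := ht'
        rw [floordiv_len s mN, Bval _ _ (by positivity), hd0]
        simp
    · have hlen : (s.toList.length : Int) < m := by
        rcases hpre' with h | h | h
        · exact absurd h hc
        · exact h
        · exact absurd h hmneg
      have hlenN : s.toList.length < mN := by omega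
      rw [chunksF, dif_neg (by omega)]
      obtain ⟨t, ht⟩ := B_some s (mN : Int) c (by omega)
      simp only [ht]
      have ht' : ∃ l, t = String.ofList l := ⟨t.toList, String.ofList_toList.symm⟩
      obtain ⟨l, rfl⟩ := ht'
      rw [floordiv_len s mN, Bval _ _ (by positivity), Nat.div_eq_of_lt hlenN]
      simp

-- ===== VERDICT (by name: the statement is the Claim_ definition above) =====
theorem solution_spec : Claim_equal_solution := by
  intro my_string m c _ hpre
  unfold Spec_solution
  exact solution_eq_alt my_string m c hpre
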